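-- pv_equiv track=rewrite | github.com/mimosa-project/emformat | mizarformat.py | split_with_equalsign
-- ===== SOURCE A (Python) =====
-- def findall_index(pattern, line):
--     """
--     行の中に存在する全ての特定の文字列の位置を調べる
--     Args:
--         pattern(str): 存在を調べたい文字列
--         line(str): 探索される行の文字列
--     Returns:
--         list: 全ての一致した部分の頭文字の位置
--     """
--     output_list = []
--     for index in range(len(line)-len(pattern)+1):
--         if line[index: index+len(pattern)] == pattern:
--             output_list.append(index)
--     return output_list
--
-- def split_with_equalsign(input_lines):
--     """
--     '.='で行を分割して,文を作り直す
--     Args: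
--         input_lines(list): 1行が1要素として格納された文字列
--     Returns:
--         list: '.='で行が分割された文字列
--     """
--     output_lines = []
--     for line in input_lines:
--         split_index_list = []   # '.='の'.'の位置のリスト
--         if '.=' in line:
--             split_index_list = findall_index('.=', line)
--             start_index = 0
--             end_index = 0
--             for split_index in split_index_list:
--                 end_index = split_index   # '.='の直前が区切り
--                 output_lines.append(line[start_index: end_index])
--                 start_index = end_index
--             output_lines.append(line[start_index:])
--         else:
--             output_lines.append(line)
--     return output_lines
-- ===== SOURCE B (Python) =====
-- def split_with_equalsign(input_lines):
--     output_lines = []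
--     for line in input_lines:
--         parts = line.split('.=')
--         output_lines.append(parts[0])
--         for p in parts[1:]:
--             output_lines.append('.=' + p)
--     return output_lines
-- ===== Notes on version B (the rewrite author's own statement) =====
-- stated objective: simpler
-- what changed: Replaced the hand-rolled index scan (findall_index over every position plus a slice-emitting loop with start/end bookkeeping) by str.split('.=') followed by re-prefixing '.=' to every part after the first; no index arithmetic or substring membership test remains.
import Mathlib
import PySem

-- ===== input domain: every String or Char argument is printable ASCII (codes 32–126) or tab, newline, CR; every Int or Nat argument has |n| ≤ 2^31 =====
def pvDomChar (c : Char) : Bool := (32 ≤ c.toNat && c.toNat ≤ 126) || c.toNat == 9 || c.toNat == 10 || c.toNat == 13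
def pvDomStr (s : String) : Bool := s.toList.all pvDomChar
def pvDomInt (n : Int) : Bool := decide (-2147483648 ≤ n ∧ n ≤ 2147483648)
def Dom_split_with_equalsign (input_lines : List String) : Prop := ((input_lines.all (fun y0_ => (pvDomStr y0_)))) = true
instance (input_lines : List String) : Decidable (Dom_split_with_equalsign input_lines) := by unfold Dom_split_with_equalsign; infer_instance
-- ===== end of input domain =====

-- B replaces A's hand-rolled index scan (findall_index + slice-emitting loop) by str.split('.=')
-- followed by re-prefixing '.=' to every part after the first: simpler decomposition, same values.


-- ===== PORT A =====
def findall_index (pattern : String) (line : String) : List Int :=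
  (PySem.List.pyRange 0 (PySem.Str.len line - PySem.Str.len pattern + 1) 1).foldl
    (fun output_list index =>
      if PySem.Str.slice line (some index) (some (index + PySem.Str.len pattern)) == pattern
      then output_list ++ [index] else output_list) []

def split_with_equalsign (input_lines : List String) : List String :=
  input_lines.foldl (fun output_lines line =>
    if PySem.Str.isIn ".=" line then
      let split_index_list := findall_index ".=" line
      let st := split_index_list.foldl
        (fun (st : List String × Int) split_index =>
          (st.1 ++ [PySem.Str.slice line (some st.2) (some split_index)], split_index))
        (output_lines, 0)
      st.1 ++ [PySem.Str.slice line (some st.2) none]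
    else
      output_lines ++ [line]) []

-- ===== PORT B =====
-- 'line.split(".=")' is PySem.Str.split?; the separator ".=" is nonempty, so it always returns
-- 'some parts' with 'parts' nonempty (parts[0] never raises: pyGetD's default is unreachable).
-- 'parts[1:]' is PySem.List.slice, '".=" + p' is String append (exact for Python str +).
def split_with_equalsign_alt (input_lines : List String) : List String :=
  input_lines.foldl (fun output_lines line =>
    match PySem.Str.split? line ".=" with
    | none => output_lines
    | some parts =>
        (output_lines ++ [PySem.List.pyGetD parts 0 ""]) ++
          (PySem.List.slice parts (some 1) none).map (fun p => ".=" ++ p)) []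

-- ===== PRECONDITION & SPEC =====
def Spec_split_with_equalsign (input_lines : List String) (out : List String) : Prop := out = split_with_equalsign_alt input_lines
instance (input_lines : List String) (out : List String) : Decidable (Spec_split_with_equalsign input_lines out) := by unfold Spec_split_with_equalsign; infer_instance

-- ===== CLAIM (what is proved, stated in full; the proofs are below) =====
def Claim_equal_split_with_equalsign : Prop := ∀ (input_lines : List String), Dom_split_with_equalsign input_lines → Spec_split_with_equalsign input_lines (split_with_equalsign input_lines)

-- ===== LEMMAS AND PROOFS =====

def patL : List Char := ['.', '=']
lemma findgo_add (sub : List Char) (hsub : sub ≠ []) :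
    ∀ (l : List Char) (k : Nat), PySem.Chars.find.go sub l k =
      if PySem.Chars.find.go sub l 0 = -1 then -1 else PySem.Chars.find.go sub l 0 + k := by
  intro l
  induction l with
  | nil =>
      intro k
      simp [PySem.Chars.find.go, List.isEmpty_iff, hsub]
  | cons c t ih =>
      intro k
      by_cases hp : sub.isPrefixOf (c :: t)
      · simp [PySem.Chars.find.go, hp]
      · have hge : -1 ≤ PySem.Chars.find.go sub t 0 := by
          have := PySem.Chars.neg_one_le_find t sub
          simpa [PySem.Chars.find] using this
        simp only [PySem.Chars.find.go, hp]
        rw [ih (k+1), ih 1]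
        split_ifs with h1 h2 h3 <;> push_cast <;> omega
lemma find_cons (c : Char) (t : List Char) (hnp : ¬ patL.isPrefixOf (c :: t)) :
    PySem.Chars.find (c :: t) patL =
      if PySem.Chars.find t patL = -1 then -1 else PySem.Chars.find t patL + 1 := by
  show PySem.Chars.find.go _ _ 0 = _
  simp only [PySem.Chars.find.go, hnp]
  rw [findgo_add patL (by simp [patL]) t 1]
  rfl
def pieces (s : List Char) : List (List Char) :=
  let i := PySem.Chars.find s patL
  if h : 0 ≤ i then
    s.take i.toNat :: pieces (s.drop (i.toNat + 2))
  else [s]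
termination_by s.length
decreasing_by
  have hsp := (PySem.Chars.find_spec h).1
  have h2 : patL.length ≤ (s.drop i.toNat).length := hsp.length_le
  simp [patL] at h2
  simp
  omega


lemma pieces_neg {s : List Char} (h : PySem.Chars.find s patL < 0) : pieces s = [s] := by
  conv_lhs => rw [pieces]
  rw [dif_neg (by omega)]

lemma pieces_pos {s : List Char} (h : 0 ≤ PySem.Chars.find s patL) :
    pieces s = s.take (PySem.Chars.find s patL).toNat ::
      pieces (s.drop ((PySem.Chars.find s patL).toNat + 2)) := by
  conv_lhs => rw [pieces]
  rw [dif_pos h]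

lemma pieces_cons (c : Char) (t : List Char) (hnp : ¬ patL.isPrefixOf (c :: t)) :
    pieces (c :: t) = match pieces t with
      | p :: rest => (c :: p) :: rest
      | [] => [[c]] := by
  have hf := find_cons c t hnp
  have hge : -1 ≤ PySem.Chars.find t patL := PySem.Chars.neg_one_le_find t patL
  by_cases h0 : PySem.Chars.find t patL = -1
  · rw [pieces_neg (by rw [hf]; simp [h0]), pieces_neg (by omega)]
  · have hpos : 0 ≤ PySem.Chars.find t patL := by omega
    rw [pieces_pos (by rw [hf]; simp [h0]; omega), pieces_pos hpos, hf]
    simp only [h0, if_false]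
    have htn : (PySem.Chars.find t patL + 1).toNat = (PySem.Chars.find t patL).toNat + 1 := by omega
    simp [htn]
lemma pieces_ne_nil (s : List Char) : pieces s ≠ [] := by
  rw [pieces]; split <;> simp

lemma splitOn_go_spec : ∀ (fuel : Nat), ∀ (l cur : List Char) (acc : List (List Char)),
    l.length + 1 ≤ fuel →
    PySem.Chars.splitOn.go patL fuel l cur acc =
      acc.reverse ++ (match pieces l with
        | p :: rest => (cur.reverse ++ p) :: rest
        | [] => [cur.reverse]) := by
  intro fuel
  induction fuel with
  | zero => intro l cur acc h; omega
  | succ f ih =>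
      intro l cur acc h
      match l with
      | [] =>
          have : pieces ([] : List Char) = [[]] := by
            apply pieces_neg
            have : PySem.Chars.find ([] : List Char) patL = -1 := by decide
            omega
          simp [PySem.Chars.splitOn.go, this]
      | c :: rest =>
          by_cases hp : patL.isPrefixOf (c :: rest)
          · have hfind : PySem.Chars.find (c :: rest) patL = 0 := by
              show PySem.Chars.find.go _ _ 0 = 0
              simp [PySem.Chars.find.go, hp]
            have h2 : List.drop patL.length (c :: rest) = List.drop 2 (c :: rest) := by
              simp [patL]
            obtain ⟨p, ps, hu⟩ := List.exists_cons_of_ne_nil (pieces_ne_nil (List.drop 2 (c :: rest)))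
            have hpieces : pieces (c :: rest) = [] :: p :: ps := by
              rw [pieces_pos (le_of_eq hfind.symm)]
              simp [hfind]
              simpa using hu
            rw [show PySem.Chars.splitOn.go patL (f+1) (c::rest) cur acc =
              PySem.Chars.splitOn.go patL f (List.drop patL.length (c::rest)) [] (cur.reverse :: acc) by
                simp [PySem.Chars.splitOn.go, hp]]
            rw [h2, ih _ _ _ (by simp at h ⊢; omega), hu, hpieces]
            simp
          · rw [show PySem.Chars.splitOn.go patL (f+1) (c::rest) cur acc =
              PySem.Chars.splitOn.go patL f rest (c :: cur) acc by
                simp [PySem.Chars.splitOn.go, hp]]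
            rw [ih _ _ _ (by simp at h ⊢; omega)]
            rw [pieces_cons c rest hp]
            obtain ⟨p, ps, hu⟩ := List.exists_cons_of_ne_nil (pieces_ne_nil rest)
            rw [hu]
            simp

lemma splitOn_eq_pieces (s : List Char) : PySem.Chars.splitOn s patL = pieces s := by
  rw [PySem.Chars.splitOn, splitOn_go_spec (s.length + 1) s [] [] (by omega)]
  obtain ⟨p, ps, hu⟩ := List.exists_cons_of_ne_nil (pieces_ne_nil s)
  rw [hu]
  simp
def occL (s : List Char) : List Nat :=
  (List.range (s.length - 1)).filter (fun j => patL.isPrefixOf (s.drop j))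

lemma occ_shift (s : List Char) (h : 0 ≤ PySem.Chars.find s patL) :
    occL s = (PySem.Chars.find s patL).toNat ::
      (occL (s.drop ((PySem.Chars.find s patL).toNat + 2))).map
        (fun k => k + ((PySem.Chars.find s patL).toNat + 2)) := by
  obtain ⟨hpre, hfirst⟩ := PySem.Chars.find_spec h
  set i := (PySem.Chars.find s patL).toNat with hi
  set u := s.drop (i + 2) with hu
  have hlen : i + 2 ≤ s.length := by
    have := hpre.length_le
    simp [patL] at this
    omega
  obtain ⟨w, hw⟩ := hpre
  have huw : u = w := by
    rw [hu, ← List.drop_drop (i := 2) (j := i) (l := s), ← hw]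
    simp [patL]
  have hdropi : s.drop i = patL ++ u := by rw [huw, hw]
  have hdrop1 : s.drop (i+1) = '=' :: u := by
    rw [← List.drop_drop (i := 1) (j := i) (l := s), hdropi]
    simp [patL]
  have hnot1 : patL.isPrefixOf (s.drop (i+1)) = false := by
    rw [hdrop1]
    simp [patL, List.isPrefixOf]
  have hulen : u.length = s.length - (i + 2) := by simp [hu]
  rw [occL, show s.length - 1 = (i+1) + (s.length - (i+2)) by omega, List.range_add,
    List.filter_append]
  have hpart1 : (List.range (i+1)).filter (fun j => patL.isPrefixOf (s.drop j)) = [i] := by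
    rw [List.range_succ, List.filter_append]
    rw [List.filter_eq_nil_iff.mpr (by
      intro j hj
      simp at hj ⊢
      intro hpj
      exact hfirst j hj hpj)]
    simp [hdropi, patL, List.isPrefixOf]
  rw [hpart1, List.filter_map]
  rcases hm : s.length - (i+2) with _ | m'
  · simp [occL, hulen, hm]
  · have hmu : u.length = m' + 1 := by omega
    have hq : occL u = (List.range m').filter (fun k => patL.isPrefixOf (u.drop k)) := by
      rw [occL, hmu]
      simp
    rw [List.range_succ_eq_map, List.filter_cons]
    have h0 : ((fun j => patL.isPrefixOf (s.drop j)) ∘ (fun x => (i+1) + x)) 0 = false := by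
      simpa using hnot1
    rw [h0]
    simp only [Bool.false_eq_true, if_false]
    rw [List.filter_map]
    have hcong : (List.range m').filter (((fun j => patL.isPrefixOf (s.drop j)) ∘ (fun x => (i+1) + x)) ∘ Nat.succ)
        = (List.range m').filter (fun k => patL.isPrefixOf (u.drop k)) := by
      apply List.filter_congr
      intro k _
      have : u.drop k = s.drop ((i+1) + (k+1)) := by
        rw [hu, List.drop_drop, show (i+2) + k = (i+1) + (k+1) by omega]
      simp [Function.comp, this]
    rw [hcong, ← hq, List.singleton_append, List.map_map]
    congr 1
    apply List.map_congr_left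
    intro k _
    simp [Function.comp]
    omega
lemma findall_eq (line : String) :
    findall_index ".=" line = (occL line.toList).map Nat.cast := by
  unfold findall_index
  rw [PySem.List.foldl_append_if
    (fun index => PySem.Str.slice line (some index) (some (index + PySem.Str.len ".=")) == ".=")
    (fun (x : Int) => x)]
  rw [show PySem.Str.len ".=" = 2 by decide]
  rw [PySem.Str.len_eq, PySem.List.pyRange_one]
  rw [List.filter_map, occL]
  have hn : ((line.toList.length : Int) - 2 + 1 - 0).toNat = line.toList.length - 1 := by omega
  rw [hn]
  have hpred : ∀ k ∈ List.range (line.toList.length - 1),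
      ((fun index => PySem.Str.slice line (some index) (some (index + 2)) == ".=") ∘
        (fun (k : Nat) => (0 : Int) + ↑k)) k
      = (fun j => patL.isPrefixOf (line.toList.drop j)) k := by
    intro k _
    have hsl : (PySem.Str.slice line (some ((k : Int))) (some ((k : Int) + 2))).toList
        = List.take 2 (List.drop k line.toList) := by
      rw [PySem.Str.toList_slice, PySem.Chars.slice_eq_listSlice,
        show ((k : Int) + 2) = ((k + 2 : Nat) : Int) by push_cast; ring,
        PySem.List.slice_natCast]
      congr 1
      omega
    simp only [Function.comp_apply, zero_add]
    rw [Bool.eq_iff_iff, beq_iff_eq, List.isPrefixOf_iff_prefix,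
      ← String.toList_inj, hsl, List.prefix_iff_eq_take,
      show (".=" : String).toList = patL by decide,
      show patL.length = 2 by decide]
    constructor
    · intro hx; exact hx.symm
    · intro hx; exact hx.symm
  rw [List.filter_congr hpred]
  have hfm : ∀ (l : List Nat), List.flatMap (fun a => [((a : Nat) : Int)]) l
      = List.map (fun a => ((a : Nat) : Int)) l := by
    intro l
    induction l with
    | nil => rfl
    | cons x xs ih => simp [ih]
  simp
lemma drop_eq_pat_append {s : List Char} {i : Nat} (hpre : patL <+: s.drop i) :
    s.drop i = patL ++ s.drop (i + 2) := by
  obtain ⟨w, hw⟩ := hpre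
  have h2 : s.drop (i + 2) = w := by
    rw [show i + 2 = i + 2 from rfl, ← List.drop_drop (i := 2) (j := i) (l := s), ← hw]
    simp [patL]
  rw [h2, hw]

lemma occL_nil {u : List Char} (hocc : occL u = []) : pieces u = [u] := by
  by_cases hge : 0 ≤ PySem.Chars.find u patL
  · exfalso
    have hpre := (PySem.Chars.find_spec hge).1
    have hlen : (PySem.Chars.find u patL).toNat + 2 ≤ u.length := by
      have h2 := hpre.length_le
      rw [List.length_drop] at h2
      have hp2 : patL.length = 2 := by simp [patL]
      omega
    have : (PySem.Chars.find u patL).toNat ∈ occL u := by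
      rw [occL, List.mem_filter]
      exact ⟨List.mem_range.mpr (by omega), List.isPrefixOf_iff_prefix.mpr hpre⟩
    rw [hocc] at this
    exact absurd this (List.not_mem_nil)
  · exact pieces_neg (Int.not_le.mp hge)

lemma loopA_spec : ∀ (n : Nat) (occ' : List Nat), occ'.length ≤ n →
    ∀ (line : String) (i : Nat) (acc : List String),
    patL <+: line.toList.drop i →
    occ' = occL (line.toList.drop (i + 2)) →
    (let st := (occ'.map (fun k => ((k + (i + 2) : Nat) : Int))).foldl
        (fun (st : List String × Int) j =>
          (st.1 ++ [PySem.Str.slice line (some st.2) (some j)], j)) (acc, (i : Int))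
     st.1 ++ [PySem.Str.slice line (some st.2) none])
    = acc ++ (pieces (line.toList.drop (i + 2))).map (fun t => String.ofList (patL ++ t)) := by
  intro n
  induction n with
  | zero =>
      intro occ' hn line i acc hpre hocc
      have hocc0 : occ' = [] := by simpa using List.length_eq_zero_iff.mp (by omega)
      subst hocc0
      rw [occL_nil hocc.symm]
      simp only [List.map_nil, List.foldl_nil]
      have hsl : PySem.Str.slice line (some (i : Int)) none
          = String.ofList (patL ++ line.toList.drop (i + 2)) := by
        apply String.toList_inj.mp
        rw [PySem.Str.toList_slice, PySem.Chars.slice_eq_listSlice,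
          PySem.List.slice_from_natCast, String.toList_ofList]
        exact drop_eq_pat_append hpre
      rw [hsl]
      simp
  | succ n ih =>
      intro occ' hn line i acc hpre hocc
      match occ' with
      | [] =>
          rw [occL_nil hocc.symm]
          simp only [List.map_nil, List.foldl_nil]
          have hsl : PySem.Str.slice line (some (i : Int)) none
              = String.ofList (patL ++ line.toList.drop (i + 2)) := by
            apply String.toList_inj.mp
            rw [PySem.Str.toList_slice, PySem.Chars.slice_eq_listSlice,
              PySem.List.slice_from_natCast, String.toList_ofList]
            exact drop_eq_pat_append hpre
          rw [hsl]
          simp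
      | k :: rest =>
          set s := line.toList with hs
          set u := s.drop (i + 2) with hu
          have hfind : 0 ≤ PySem.Chars.find u patL := by
            rw [PySem.Chars.find_nonneg_iff]
            have hk : k ∈ occL u := by rw [← hocc]; exact List.mem_cons_self
            rw [occL, List.mem_filter] at hk
            exact List.IsInfix.trans (List.isPrefixOf_iff_prefix.mp hk.2).isInfix
              (List.drop_suffix _ _).isInfix
          set i₁ := (PySem.Chars.find u patL).toNat with hi₁
          set u₂ := u.drop (i₁ + 2) with hu₂
          have hshift := occ_shift u hfind
          rw [← hocc] at hshift
          have hk : k = i₁ := (List.cons.injEq _ _ _ _).mp hshift |>.1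
          have hrest : rest = (occL u₂).map (fun m => m + (i₁ + 2)) :=
            (List.cons.injEq _ _ _ _).mp hshift |>.2
          have hpre₁ : patL <+: u.drop i₁ := (PySem.Chars.find_spec hfind).1
          -- the position of this occurrence in the whole line, and the new start index
          set j : Nat := k + (i + 2) with hj
          have hdropj : s.drop j = u.drop i₁ := by
            rw [hu, List.drop_drop, hj, hk]
            congr 1
            omega
          have hprej : patL <+: s.drop j := hdropj ▸ hpre₁
          have hdropj2 : s.drop (j + 2) = u₂ := by
            rw [hu₂, hu, List.drop_drop]
            congr 1
            omega
          -- the first emitted segment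
          have hslice : PySem.Str.slice line (some (i : Int)) (some ((k + (i + 2) : Nat) : Int))
              = String.ofList (patL ++ u.take i₁) := by
            apply String.toList_inj.mp
            rw [PySem.Str.toList_slice, PySem.Chars.slice_eq_listSlice,
              PySem.List.slice_natCast, String.toList_ofList, ← hs,
              show k + (i + 2) - i = 2 + k by omega,
              drop_eq_pat_append hpre, ← hu,
              show (2 : Nat) + k = patL.length + k by simp [patL],
              List.take_append, hk]
            simp only [patL]
            rw [List.take_of_length_le (by simp)]
            simp
          -- the remaining index list matches the IH's shape for start j
          have hmap : (rest.map (fun m => ((m + (i + 2) : Nat) : Int)))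
              = (occL u₂).map (fun m => ((m + (j + 2) : Nat) : Int)) := by
            rw [hrest, List.map_map]
            apply List.map_congr_left
            intro m _
            simp only [Function.comp_apply]
            congr 1
            omega
          simp only [List.map_cons, List.foldl_cons]
          rw [hslice]
          have hih := ih (occL u₂) (by
              have : rest.length = (occL u₂).length := by rw [hrest, List.length_map]
              simp at hn
              omega)
            line j (acc ++ [String.ofList (patL ++ u.take i₁)]) hprej (by rw [hdropj2])
          rw [show ((k + (i + 2) : Nat) : Int) = ((j : Nat) : Int) from Nat.cast_inj.mpr hj.symm,
            hmap, hih, hdropj2, pieces_pos hfind, ← hi₁, ← hu₂]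
          simp
lemma split?_eq (line : String) :
    PySem.Str.split? line ".=" = some ((pieces line.toList).map String.ofList) := by
  rw [PySem.Str.split?, show (".=" : String).toList = patL by decide]
  have : PySem.Chars.split? line.toList patL = some (PySem.Chars.splitOn line.toList patL) := by
    rw [PySem.Chars.split?, if_neg (by simp [patL])]
  rw [this, splitOn_eq_pieces]
  rfl

lemma prefix_str (t : List Char) : (".=" : String) ++ String.ofList t = String.ofList (patL ++ t) := by
  apply String.toList_inj.mp
  rw [String.toList_append, String.toList_ofList, String.toList_ofList]
  simp [patL]

lemma step_eq (out : List String) (line : String) :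
    (if PySem.Str.isIn ".=" line then
      let split_index_list := findall_index ".=" line
      let st := split_index_list.foldl
        (fun (st : List String × Int) split_index =>
          (st.1 ++ [PySem.Str.slice line (some st.2) (some split_index)], split_index))
        (out, 0)
      st.1 ++ [PySem.Str.slice line (some st.2) none]
    else out ++ [line])
    = (match PySem.Str.split? line ".=" with
    | none => out
    | some parts =>
        (out ++ [PySem.List.pyGetD parts 0 ""]) ++
          (PySem.List.slice parts (some 1) none).map (fun p => ".=" ++ p)) := by
  rw [split?_eq]
  by_cases hin : PySem.Str.isIn ".=" line
  · -- the line contains '.='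
    rw [if_pos hin]
    have hinf : patL <:+: line.toList := by
      rw [show patL = (".=" : String).toList by decide]
      exact (PySem.Chars.isIn_iff_infix _ _).mp hin
    have hfind : 0 ≤ PySem.Chars.find line.toList patL :=
      (PySem.Chars.find_nonneg_iff _ _).mpr hinf
    set i₀ := (PySem.Chars.find line.toList patL).toNat with hi₀
    set u := line.toList.drop (i₀ + 2) with hu
    have hpre : patL <+: line.toList.drop i₀ := (PySem.Chars.find_spec hfind).1
    rw [findall_eq, occ_shift _ hfind, ← hi₀, ← hu]
    simp only [List.map_cons, List.foldl_cons, List.map_map]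
    have hslice0 : PySem.Str.slice line (some 0) (some ((i₀ : Nat) : Int))
        = String.ofList (line.toList.take i₀) := by
      apply String.toList_inj.mp
      rw [PySem.Str.toList_slice, PySem.Chars.slice_eq_listSlice, String.toList_ofList,
        show (0 : Int) = ((0 : Nat) : Int) by rfl, PySem.List.slice_natCast]
      simp
    rw [hslice0]
    have hmap : (occL u).map ((Nat.cast : Nat → Int) ∘ (fun k => k + (i₀ + 2)))
        = (occL u).map (fun k => ((k + (i₀ + 2) : Nat) : Int)) := rfl
    rw [hmap, loopA_spec (occL u).length (occL u) le_rfl line i₀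
      (out ++ [String.ofList (line.toList.take i₀)]) hpre (by rw [← hu])]
    rw [pieces_pos hfind, ← hi₀, ← hu]
    simp only [List.map_cons, PySem.List.pyGetD_zero_cons, PySem.List.slice_from_one,
      List.tail_cons, List.map_map, List.append_assoc, List.cons_append, List.nil_append]
    congr 1
    congr 1
    apply List.map_congr_left
    intro t _
    exact (prefix_str t).symm
  · rw [if_neg hin]
    have hninf : ¬ patL <:+: line.toList := by
      rw [show patL = (".=" : String).toList by decide]
      exact (PySem.Chars.isIn_eq_false_iff _ _).mp (by simpa using hin)
    have : pieces line.toList = [line.toList] :=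
      pieces_neg (by rw [(PySem.Chars.find_eq_neg_one_iff _ _).mpr hninf]; omega)
    rw [this]
    simp [PySem.List.slice_from_one]

-- ===== VERDICT (by name: the statement is the Claim_ definition above) =====
theorem split_with_equalsign_spec : Claim_equal_split_with_equalsign := by
  intro input_lines hd
  unfold Spec_split_with_equalsign split_with_equalsign split_with_equalsign_alt
  induction input_lines using List.reverseRecOn with
  | nil => rfl
  | append_singleton ls line ih =>
      have hd' : Dom_split_with_equalsign ls := by
        unfold Dom_split_with_equalsign at *; simp_all
      rw [List.foldl_append, List.foldl_append, ih hd']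
      simp only [List.foldl_cons, List.foldl_nil]
      exact step_eq _ line
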